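-- pv_equiv track=rewrite | github.com/figlesias7/realforeclose | fetch.py | extract_auctions_waiting
-- ===== SOURCE A (Python) =====
-- def extract_auctions_waiting(text: str) -> str:
--     start = text.find("Auctions Waiting")
--     if start == -1:
--         return ""
--
--     section = text[start:]
--
--     stop_markers = [
--         "Auctions Closed",
--         "Closed Auctions",
--         "Canceled Auctions",
--         "Auctions Canceled",
--         "Sales List",
--         "Connection",
--         "About Us | Site Map |",
--     ]
--
--     end_positions = [section.find(marker) for marker in stop_markers if section.find(marker) != -1]
--     if end_positions:
--         section = section[:min(end_positions)]
--
--     return section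
-- ===== SOURCE B (Python) =====
-- STOP_MARKERS = (
--     "Auctions Closed",
--     "Closed Auctions",
--     "Canceled Auctions",
--     "Auctions Canceled",
--     "Sales List",
--     "Connection",
--     "About Us | Site Map |",
-- )
--
--
-- def extract_auctions_waiting(text: str) -> str:
--     start = text.find("Auctions Waiting")
--     if start == -1:
--         return ""
--     section = text[start:]
--     # single left-to-right scan: cut at the first position where any marker starts
--     for i in range(len(section)):
--         if any(section.startswith(m, i) for m in STOP_MARKERS):
--             return section[:i]
--     return section
-- ===== Notes on version B (the rewrite author's own statement) =====
-- stated objective: alternative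
-- what changed: Instead of running find() once per marker over the whole section and taking the min of the hit positions, B makes a single left-to-right scan and cuts at the first position where any stop marker starts.
import Mathlib
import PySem

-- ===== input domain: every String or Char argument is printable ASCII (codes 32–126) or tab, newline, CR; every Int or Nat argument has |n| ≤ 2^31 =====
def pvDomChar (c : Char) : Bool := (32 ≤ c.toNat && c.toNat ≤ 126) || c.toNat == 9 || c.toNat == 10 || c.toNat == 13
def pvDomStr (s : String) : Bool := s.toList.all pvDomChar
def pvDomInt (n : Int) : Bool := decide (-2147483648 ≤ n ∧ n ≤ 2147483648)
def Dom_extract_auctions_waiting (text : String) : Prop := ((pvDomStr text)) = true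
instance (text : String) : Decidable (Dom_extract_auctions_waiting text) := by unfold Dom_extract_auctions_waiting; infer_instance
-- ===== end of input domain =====

-- B replaces A's per-marker find()+min with a single left-to-right scan cutting at the
-- first position where any stop marker starts (objective: alternative, same result).

def awNeedle : List Char := "Auctions Waiting".toList

def awMarkers : List (List Char) :=
  [ "Auctions Closed".toList
  , "Closed Auctions".toList
  , "Canceled Auctions".toList
  , "Auctions Canceled".toList
  , "Sales List".toList
  , "Connection".toList
  , "About Us | Site Map |".toList ]

-- ===== PORT A =====
def extract_auctions_waiting (text : String) : String :=
  let s := text.toList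
  let start := PySem.Chars.find s awNeedle
  if start = -1 then ""
  else
    let sec := PySem.Chars.slice s (some start) none
    let endPositions :=
      (awMarkers.filter (fun m => PySem.Chars.find sec m != -1)).map
        (fun m => PySem.Chars.find sec m)
    match PySem.List.min? endPositions (fun x => x) with
    | some p => String.ofList (PySem.Chars.slice sec none (some p))
    | none => String.ofList sec

-- ===== PORT B =====
-- first index (if any) at which some stop marker starts; the for-loop of Source B
def awCut : List Char → Option Nat
  | [] => none
  | c :: rest =>
    if awMarkers.any (fun m => PySem.Chars.startswith (c :: rest) m) then some 0
    else (awCut rest).map (· + 1)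

def extract_auctions_waiting_alt (text : String) : String :=
  let s := text.toList
  let start := PySem.Chars.find s awNeedle
  if start = -1 then ""
  else
    let sec := PySem.Chars.slice s (some start) none
    match awCut sec with
    | some i => String.ofList (sec.take i)
    | none => String.ofList sec

-- ===== PRECONDITION & SPEC =====
def Spec_extract_auctions_waiting (text : String) (out : String) : Prop := out = extract_auctions_waiting_alt text
instance (text : String) (out : String) : Decidable (Spec_extract_auctions_waiting text out) := by unfold Spec_extract_auctions_waiting; infer_instance

-- ===== CLAIM (what is proved, stated in full; the proofs are below) =====
def Claim_equal_extract_auctions_waiting : Prop := ∀ (text : String), Dom_extract_auctions_waiting text → Spec_extract_auctions_waiting text (extract_auctions_waiting text)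

-- ===== LEMMAS AND PROOFS =====

lemma awMarkers_ne_nil : ∀ m ∈ awMarkers, m ≠ [] := by decide

lemma awCut_none {s : List Char} (h : awCut s = none) :
    ∀ j, ∀ m ∈ awMarkers, ¬ m <+: s.drop j := by
  induction s with
  | nil =>
    intro j m hm hp
    simp at hp
    exact awMarkers_ne_nil m hm hp
  | cons c rest ih =>
    intro j m hm hp
    rw [awCut] at h
    split at h
    · exact (Option.some_ne_none _ h).elim
    · rename_i hany
      simp only [List.any_eq_true, not_exists, not_and] at hany
      match j with
      | 0 =>
        simp only [List.drop_zero] at hp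
        exact hany m hm ((PySem.Chars.startswith_iff _ _).mpr hp)
      | j + 1 =>
        simp only [List.drop_succ_cons] at hp
        exact ih (by simpa using h) j m hm hp

lemma awCut_some {s : List Char} {i : Nat} (h : awCut s = some i) :
    (∃ m ∈ awMarkers, m <+: s.drop i) ∧ ∀ j < i, ∀ m ∈ awMarkers, ¬ m <+: s.drop j := by
  induction s generalizing i with
  | nil => simp [awCut] at h
  | cons c rest ih =>
    rw [awCut] at h
    split at h
    · rename_i hany
      obtain ⟨m, hm, hsw⟩ := List.any_eq_true.mp hany
      cases h
      refine ⟨⟨m, hm, (PySem.Chars.startswith_iff _ _).mp hsw⟩, ?_⟩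
      intro j hj
      exact absurd hj (Nat.not_lt_zero j)
    · rename_i hany
      simp only [List.any_eq_true, not_exists, not_and] at hany
      obtain ⟨a, ha, hai⟩ := Option.map_eq_some_iff.mp h
      obtain ⟨⟨m, hm, hp⟩, hmin⟩ := ih ha
      have hia : i = a + 1 := hai.symm
      subst hia
      refine ⟨⟨m, hm, by simpa using hp⟩, ?_⟩
      intro j hj m' hm' hp'
      match j with
      | 0 =>
        simp only [List.drop_zero] at hp'
        exact hany m' hm' ((PySem.Chars.startswith_iff _ _).mpr hp')
      | j + 1 =>
        exact hmin j (by omega) m' hm' (by simpa using hp')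

-- a marker occurs in sec iff it is a prefix of some suffix
lemma infix_iff_prefix_drop (m sec : List Char) :
    m <:+: sec ↔ ∃ j, m <+: sec.drop j := by
  constructor
  · intro h
    exact Iff.mpr (PySem.Chars.exists_prefix_drop_iff_isIn m sec)
      ((PySem.Chars.isIn_iff_infix _ _).mpr h)
  · intro h
    exact (PySem.Chars.isIn_iff_infix _ _).mp
      (Iff.mp (PySem.Chars.exists_prefix_drop_iff_isIn m sec) h)

-- core: A's min-of-finds cut equals B's first-match scan cut, on any section
lemma aw_core (sec : List Char) :
    (match PySem.List.min?
        ((awMarkers.filter (fun m => PySem.Chars.find sec m != -1)).map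
          (fun m => PySem.Chars.find sec m)) (fun x => x) with
      | some p => String.ofList (PySem.Chars.slice sec none (some p))
      | none => String.ofList sec)
    = (match awCut sec with
      | some i => String.ofList (sec.take i)
      | none => String.ofList sec) := by
  set EP := (awMarkers.filter (fun m => PySem.Chars.find sec m != -1)).map
      (fun m => PySem.Chars.find sec m) with hEP
  cases hcut : awCut sec with
  | none =>
    have hnone := awCut_none hcut
    have hEPnil : EP = [] := by
      rw [hEP]
      simp only [List.map_eq_nil_iff, List.filter_eq_nil_iff]
      intro m hm
      simp only [bne_iff_ne, ne_eq, not_not]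
      by_contra hne
      have hinf : m <:+: sec := (PySem.Chars.find_ne_neg_one_iff _ _).mp hne
      obtain ⟨j, hj⟩ := (infix_iff_prefix_drop m sec).mp hinf
      exact hnone j m hm hj
    rw [hEPnil]
    have h0 : PySem.List.min? ([] : List Int) (fun x => x) = none :=
      (PySem.List.min?_eq_none_iff _ _).mpr rfl
    rw [h0]
  | some i =>
    obtain ⟨⟨m₀, hm₀, hp₀⟩, hmin⟩ := awCut_some hcut
    have hf₀ : PySem.Chars.find sec m₀ ≠ -1 :=
      (PySem.Chars.find_ne_neg_one_iff _ _).mpr ((infix_iff_prefix_drop m₀ sec).mpr ⟨i, hp₀⟩)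
    have hmem₀ : PySem.Chars.find sec m₀ ∈ EP := by
      rw [hEP]
      exact List.mem_map.mpr ⟨m₀, List.mem_filter.mpr ⟨hm₀, bne_iff_ne.mpr hf₀⟩, rfl⟩
    cases hmn : PySem.List.min? EP (fun x => x) with
    | none =>
      rw [PySem.List.min?_eq_none_iff] at hmn
      rw [hmn] at hmem₀
      simp at hmem₀
    | some p =>
      have hpmem : p ∈ EP := PySem.List.min?_mem hmn
      have hple : ∀ y ∈ EP, p ≤ y := PySem.List.min?_isMin hmn
      obtain ⟨m₁, hm₁f, hp₁⟩ := List.mem_map.mp (hEP ▸ hpmem)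
      have hm₁ : m₁ ∈ awMarkers := (List.mem_filter.mp hm₁f).1
      have hf₁ : PySem.Chars.find sec m₁ ≠ -1 := bne_iff_ne.mp (List.mem_filter.mp hm₁f).2
      have hf₁0 : 0 ≤ PySem.Chars.find sec m₁ := by
        have := PySem.Chars.neg_one_le_find (s := sec) (sub := m₁); omega
      obtain ⟨hpf₁, _⟩ := PySem.Chars.find_spec hf₁0
      have hile : i ≤ (PySem.Chars.find sec m₁).toNat := by
        by_contra hlt
        exact hmin _ (by omega) m₁ hm₁ hpf₁
      have hf₀0 : 0 ≤ PySem.Chars.find sec m₀ := by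
        have := PySem.Chars.neg_one_le_find (s := sec) (sub := m₀); omega
      obtain ⟨_, hminf₀⟩ := PySem.Chars.find_spec hf₀0
      have hfle : (PySem.Chars.find sec m₀).toNat ≤ i := by
        by_contra hlt
        exact hminf₀ i (by omega) hp₀
      have hple₀ : p ≤ PySem.Chars.find sec m₀ := hple _ hmem₀
      have hp0 : 0 ≤ p := hp₁ ▸ hf₁0
      have hpi : p.toNat = i := by
        subst hp₁; omega
      simp only [PySem.Chars.slice_eq_listSlice, PySem.List.slice_to _ hp0, hpi]

-- ===== VERDICT (by name: the statement is the Claim_ definition above) =====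
theorem extract_auctions_waiting_spec : Claim_equal_extract_auctions_waiting := by
  intro text _
  unfold Spec_extract_auctions_waiting extract_auctions_waiting extract_auctions_waiting_alt
  by_cases h : PySem.Chars.find text.toList awNeedle = -1
  · simp [h]
  · simp only [h, if_false]
    exact aw_core _
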